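-- pv_equiv track=rewrite | github.com/zhuangah2000/new-ai-esg | esg_reporting_api/src/routes/role.py | create_role_permissions
-- ===== SOURCE A (Python) =====
-- DEFAULT_MODULES = [
--     'dashboard',
--     'emission_factors',
--     'measurements',
--     'suppliers',
--     'projects',
--     'esg_targets',
--     'assets',
--     'reports',
--     'settings',
--     'company',      # Added for Settings unified permission
--     'users',        # Added for Settings unified permission
--     'roles',        # Added for Settings unified permission
--     'api_keys'      # Added for Settings unified permission
-- ]
--
-- def get_default_permissions():
--     """Get default permissions structure with all modules"""
--     permissions = {}
--     for module in DEFAULT_MODULES: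
--         permissions[module] = {
--             'read': False,
--             'write': False,
--             'delete': False
--         }
--     return permissions
--
-- def create_role_permissions(role_name):
--     """Create default permissions based on role name"""
--     permissions = get_default_permissions()
--
--     if role_name.lower() == 'administrator':
--         # Full access to everything
--         for module in DEFAULT_MODULES:
--             permissions[module] = {'read': True, 'write': True, 'delete': True}
--     elif role_name.lower() == 'manager':
--         # Read/write access to most modules, limited delete
--         for module in DEFAULT_MODULES:
--             if module in ['users', 'roles', 'api_keys']:
--                 permissions[module] = {'read': True, 'write': True, 'delete': False}
--             else:
--                 permissions[module] = {'read': True, 'write': True, 'delete': True}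
--     elif role_name.lower() == 'analyst':
--         # Read/write access to data modules, read-only for admin modules
--         data_modules = ['dashboard', 'emission_factors', 'measurements', 'suppliers', 'projects', 'esg_targets', 'assets', 'reports']
--         for module in DEFAULT_MODULES:
--             if module in data_modules:
--                 permissions[module] = {'read': True, 'write': True, 'delete': False}
--             else:
--                 permissions[module] = {'read': True, 'write': False, 'delete': False}
--     elif role_name.lower() == 'viewer':
--         # Read-only access to most modules
--         for module in DEFAULT_MODULES:
--             if module in ['dashboard', 'reports', 'company']:
--                 permissions[module] = {'read': True, 'write': False, 'delete': False}
--             else: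
--                 permissions[module] = {'read': False, 'write': False, 'delete': False}
--     elif role_name.lower() == 'intern':
--         # Very limited access
--         for module in DEFAULT_MODULES:
--             if module == 'dashboard':
--                 permissions[module] = {'read': True, 'write': False, 'delete': False}
--             else:
--                 permissions[module] = {'read': False, 'write': False, 'delete': False}
--
--     return permissions
-- ===== SOURCE B (Python) =====
-- DEFAULT_MODULES = [
--     'dashboard',
--     'emission_factors',
--     'measurements',
--     'suppliers',
--     'projects',
--     'esg_targets',
--     'assets',
--     'reports',
--     'settings',
--     'company',
--     'users',
--     'roles',
--     'api_keys'
-- ]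
--
-- _ADMIN_MODULES = ['users', 'roles', 'api_keys']
-- _DATA_MODULES = ['dashboard', 'emission_factors', 'measurements', 'suppliers',
--                  'projects', 'esg_targets', 'assets', 'reports']
--
-- # role -> (modules with read+write+delete, modules with read+write, modules read-only)
-- _ROLE_RULES = {
--     'administrator': (DEFAULT_MODULES, [], []),
--     'manager': ([m for m in DEFAULT_MODULES if m not in _ADMIN_MODULES], _ADMIN_MODULES, []),
--     'analyst': ([], _DATA_MODULES, [m for m in DEFAULT_MODULES if m not in _DATA_MODULES]),
--     'viewer': ([], [], ['dashboard', 'reports', 'company']),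
--     'intern': ([], [], ['dashboard']),
-- }
--
-- def create_role_permissions(role_name):
--     """Create default permissions based on role name (table-driven)."""
--     full, write, read = _ROLE_RULES.get(role_name.lower(), ([], [], []))
--     return {
--         module: {
--             'read': module in full or module in write or module in read,
--             'write': module in full or module in write,
--             'delete': module in full,
--         }
--         for module in DEFAULT_MODULES
--     }
-- ===== Notes on version B (the rewrite author's own statement) =====
-- stated objective: idiomatic
-- what changed: Replaced the five-branch if/elif chain of per-module rebuild loops with a data-driven table mapping each role to (full, write, read-only) module lists, plus a single dict comprehension over DEFAULT_MODULES that classifies each module; unknown roles fall through to an empty rule giving the all-False default.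
import Mathlib
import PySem

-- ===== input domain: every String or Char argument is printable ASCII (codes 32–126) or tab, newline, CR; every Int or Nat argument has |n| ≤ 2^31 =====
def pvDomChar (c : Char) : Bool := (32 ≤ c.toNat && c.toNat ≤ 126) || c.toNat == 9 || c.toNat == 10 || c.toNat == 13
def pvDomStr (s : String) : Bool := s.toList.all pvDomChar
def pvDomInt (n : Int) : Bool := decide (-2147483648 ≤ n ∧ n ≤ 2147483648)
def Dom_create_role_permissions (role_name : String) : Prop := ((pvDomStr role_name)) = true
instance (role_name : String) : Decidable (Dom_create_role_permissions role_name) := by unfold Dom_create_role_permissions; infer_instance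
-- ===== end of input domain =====

-- B replaces A's if/elif chain of per-role loops by a role→(full,write,read) rule table and one
-- classification pass over the module list (idiomatic/data-driven; same cost).

-- ===== PORT A =====
def pvDefaultModules : List String :=
  ["dashboard", "emission_factors", "measurements", "suppliers", "projects",
   "esg_targets", "assets", "reports", "settings", "company", "users", "roles", "api_keys"]

def pvGetDefaultPermissions : PySem.Dict String (List (String × Bool)) :=
  pvDefaultModules.foldl
    (fun d m => d.insert m [("read", false), ("write", false), ("delete", false)])
    PySem.Dict.empty

def create_role_permissions (role_name : String) : List (String × List (String × Bool)) :=
  let permissions := pvGetDefaultPermissions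
  let permissions :=
    if PySem.Str.lower role_name = "administrator" then
      pvDefaultModules.foldl
        (fun d m => d.insert m [("read", true), ("write", true), ("delete", true)]) permissions
    else if PySem.Str.lower role_name = "manager" then
      pvDefaultModules.foldl
        (fun d m =>
          if m ∈ ["users", "roles", "api_keys"] then
            d.insert m [("read", true), ("write", true), ("delete", false)]
          else
            d.insert m [("read", true), ("write", true), ("delete", true)]) permissions
    else if PySem.Str.lower role_name = "analyst" then
      let data_modules : List String :=
        ["dashboard", "emission_factors", "measurements", "suppliers", "projects",
         "esg_targets", "assets", "reports"]
      pvDefaultModules.foldl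
        (fun d m =>
          if m ∈ data_modules then
            d.insert m [("read", true), ("write", true), ("delete", false)]
          else
            d.insert m [("read", true), ("write", false), ("delete", false)]) permissions
    else if PySem.Str.lower role_name = "viewer" then
      pvDefaultModules.foldl
        (fun d m =>
          if m ∈ ["dashboard", "reports", "company"] then
            d.insert m [("read", true), ("write", false), ("delete", false)]
          else
            d.insert m [("read", false), ("write", false), ("delete", false)]) permissions
    else if PySem.Str.lower role_name = "intern" then
      pvDefaultModules.foldl
        (fun d m =>
          if m = "dashboard" then
            d.insert m [("read", true), ("write", false), ("delete", false)]
          else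
            d.insert m [("read", false), ("write", false), ("delete", false)]) permissions
    else permissions
  permissions.items

-- ===== PORT B =====
def pvAdminModules : List String := ["users", "roles", "api_keys"]
def pvDataModules : List String :=
  ["dashboard", "emission_factors", "measurements", "suppliers", "projects",
   "esg_targets", "assets", "reports"]

-- role -> (modules with read+write+delete, modules with read+write, modules read-only)
def pvRoleRules : PySem.Dict String (List String × List String × List String) :=
  PySem.Dict.ofList
    [("administrator", (pvDefaultModules, [], [])),
     ("manager", (pvDefaultModules.filter (fun m => decide (m ∉ pvAdminModules)), pvAdminModules, [])),
     ("analyst", ([], pvDataModules, pvDefaultModules.filter (fun m => decide (m ∉ pvDataModules)))),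
     ("viewer", ([], [], ["dashboard", "reports", "company"])),
     ("intern", ([], [], ["dashboard"]))]

def create_role_permissions_alt (role_name : String) : List (String × List (String × Bool)) :=
  let rule := pvRoleRules.getD (PySem.Str.lower role_name) ([], [], [])
  pvDefaultModules.map (fun module =>
    (module,
      [("read", decide (module ∈ rule.1) || decide (module ∈ rule.2.1) || decide (module ∈ rule.2.2)),
       ("write", decide (module ∈ rule.1) || decide (module ∈ rule.2.1)),
       ("delete", decide (module ∈ rule.1))]))

-- ===== PRECONDITION & SPEC =====
def Spec_create_role_permissions (role_name : String) (out : List (String × List (String × Bool))) : Prop := out = create_role_permissions_alt role_name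
instance (role_name : String) (out : List (String × List (String × Bool))) : Decidable (Spec_create_role_permissions role_name out) := by unfold Spec_create_role_permissions; infer_instance

-- ===== CLAIM (what is proved, stated in full; the proofs are below) =====
def Claim_equal_create_role_permissions : Prop := ∀ (role_name : String), Dom_create_role_permissions role_name → Spec_create_role_permissions role_name (create_role_permissions role_name)

-- ===== LEMMAS AND PROOFS =====

-- ===== VERDICT (by name: the statement is the Claim_ definition above) =====
theorem create_role_permissions_spec : Claim_equal_create_role_permissions := by
  unfold Claim_equal_create_role_permissions Spec_create_role_permissions
  intro role_name _
  unfold create_role_permissions create_role_permissions_alt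
  generalize PySem.Str.lower role_name = s
  by_cases h1 : s = "administrator"
  · subst h1; decide
  by_cases h2 : s = "manager"
  · subst h2; decide
  by_cases h3 : s = "analyst"
  · subst h3; decide
  by_cases h4 : s = "viewer"
  · subst h4; decide
  by_cases h5 : s = "intern"
  · subst h5; decide
  simp only [if_neg h1, if_neg h2, if_neg h3, if_neg h4, if_neg h5]
  have b1 : ("administrator" == s) = false := beq_eq_false_iff_ne.mpr (fun h => h1 h.symm)
  have b2 : ("manager" == s) = false := beq_eq_false_iff_ne.mpr (fun h => h2 h.symm)
  have b3 : ("analyst" == s) = false := beq_eq_false_iff_ne.mpr (fun h => h3 h.symm)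
  have b4 : ("viewer" == s) = false := beq_eq_false_iff_ne.mpr (fun h => h4 h.symm)
  have b5 : ("intern" == s) = false := beq_eq_false_iff_ne.mpr (fun h => h5 h.symm)
  have hrule : pvRoleRules.getD s ([], [], []) = ([], [], []) := by
    simp [pvRoleRules, PySem.Dict.getD, PySem.Dict.ofList, PySem.Dict.update, PySem.Dict.insert,
          PySem.Dict.get?, PySem.Dict.contains, PySem.Dict.empty, List.find?,
          b1, b2, b3, b4, b5]
  rw [hrule]
  decide
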